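-- pv_equiv track=rewrite | github.com/b-lukaszuk/python_luzne_zadanka | book1/ch08/task4/main.py | can_make_change
-- ===== SOURCE A (Python) =====
-- from typing import List
--
-- def can_make_change(amount_cents: int, coins: List[int]) -> bool:
--     if amount_cents == 0 and len(coins) == 0:
--         return True
--     if amount_cents <= 0 and len(coins) > 0:
--         return False
--     if amount_cents >= 0 and len(coins) == 0:
--         return False
--     else:
--         return can_make_change(amount_cents - coins[0], coins[1:])
-- ===== SOURCE B (Python) =====
-- def can_make_change(amount_cents, coins):
--     a = amount_cents
--     for c in coins:
--         if a <= 0: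
--             return False
--         a -= c
--     return a == 0
-- ===== Notes on version B (the rewrite author's own statement) =====
-- stated objective: simpler
-- what changed: Replaced the four-branch recursion (which copies coins[1:] at every step) by a single iterative loop over the coins keeping a running remainder, with an early exit when it is no longer positive and a final exact-zero check.
import Mathlib
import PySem

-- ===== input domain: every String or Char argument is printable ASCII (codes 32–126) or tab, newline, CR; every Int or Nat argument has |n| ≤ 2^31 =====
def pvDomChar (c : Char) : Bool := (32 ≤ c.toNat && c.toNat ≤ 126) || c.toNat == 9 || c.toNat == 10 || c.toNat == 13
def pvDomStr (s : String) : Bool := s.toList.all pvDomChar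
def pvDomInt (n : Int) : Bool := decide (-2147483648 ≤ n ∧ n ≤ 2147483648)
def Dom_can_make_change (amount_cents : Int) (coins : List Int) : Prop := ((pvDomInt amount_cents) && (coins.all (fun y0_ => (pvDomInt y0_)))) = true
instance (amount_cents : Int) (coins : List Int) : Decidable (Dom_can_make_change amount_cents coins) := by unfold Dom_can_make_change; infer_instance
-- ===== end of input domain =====

-- B replaces A's four-branch recursion by a simple iterative loop (running remainder, early exit, final zero check); A raises IndexError on some inputs, excluded by Pre_.


-- ===== PORT A =====
-- Literal transliteration of A. In the final 'else', Python evaluates coins[0] / coins[1:];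
-- on a non-empty list these are exactly head/tail; on the empty list coins[0] RAISES
-- IndexError — that input is excluded by Pre_ below, and the port returns false there.
def can_make_change (amount_cents : Int) (coins : List Int) : Bool :=
  if amount_cents = 0 ∧ coins.length = 0 then true
  else if amount_cents ≤ 0 ∧ coins.length > 0 then false
  else if amount_cents ≥ 0 ∧ coins.length = 0 then false
  else
    match coins with
    | [] => false  -- Python raises IndexError here (outside Pre_)
    | c :: rest => can_make_change (amount_cents - c) rest

-- ===== PORT B =====
-- the for-loop of Source B with its early return, as structural recursion over the coins
def canMakeChangeLoop (a : Int) (coins : List Int) : Bool :=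
  match coins with
  | [] => a == 0
  | c :: rest => if a ≤ 0 then false else canMakeChangeLoop (a - c) rest

def can_make_change_alt (amount_cents : Int) (coins : List Int) : Bool :=
  canMakeChangeLoop amount_cents coins

-- ===== PRECONDITION & SPEC =====
-- the run of A raises IndexError iff every partial remainder is positive but the final one is negative
def pyRaiseCond (amount_cents : Int) (coins : List Int) : Prop :=
  (∀ i ∈ List.range coins.length, amount_cents - (coins.take i).sum > 0) ∧
    amount_cents - coins.sum < 0

-- Pre_ excludes exactly the inputs on which Python A raises IndexError (coins[0] on an empty slice).
def Pre_can_make_change (amount_cents : Int) (coins : List Int) : Prop :=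
  ¬ pyRaiseCond amount_cents coins

instance (amount_cents : Int) (coins : List Int) : Decidable (Pre_can_make_change amount_cents coins) := by
  unfold Pre_can_make_change pyRaiseCond; infer_instance

def pvWitness_can_make_change : Int × List Int := (5, [2, 3])

def Spec_can_make_change (amount_cents : Int) (coins : List Int) (out : Bool) : Prop :=
  out = can_make_change_alt amount_cents coins
instance (amount_cents : Int) (coins : List Int) (out : Bool) : Decidable (Spec_can_make_change amount_cents coins out) := by unfold Spec_can_make_change; infer_instance

-- ===== CLAIM (what is proved, stated in full; the proofs are below) =====
def Claim_equal_can_make_change : Prop := ∀ (amount_cents : Int) (coins : List Int), Dom_can_make_change amount_cents coins → Pre_can_make_change amount_cents coins → Spec_can_make_change amount_cents coins (can_make_change amount_cents coins)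

-- ===== LEMMAS AND PROOFS =====
-- The two ports agree on every input (the port of A returns false where Python A would
-- raise, and B's loop returns false there too); Pre_ is needed for the Python-level claim.
theorem ports_agree (coins : List Int) : ∀ a : Int, can_make_change a coins = canMakeChangeLoop a coins := by
  induction coins with
  | nil =>
    intro a
    unfold can_make_change canMakeChangeLoop
    by_cases h : a = 0 <;> simp [h]
  | cons c rest ih =>
    intro a
    unfold can_make_change canMakeChangeLoop
    by_cases h : a ≤ 0
    · rw [if_neg (by simp), if_pos ⟨h, by simp⟩, if_pos h]
    · simp only [List.length_cons]
      rw [if_neg (by omega), if_neg (by omega), if_neg (by omega), if_neg (by omega)]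
      exact ih (a - c)

-- ===== VERDICT (by name: the statement is the Claim_ definition above) =====
theorem can_make_change_spec : Claim_equal_can_make_change := by
  intro a coins _ _
  unfold Spec_can_make_change can_make_change_alt
  exact ports_agree coins a
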